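-- pv_equiv track=rewrite | github.com/NILGroup/TFG-1920-Biblioteca | Servidor/Actions/ActionSearchEntity.py | get_entities_values
-- ===== SOURCE A (Python) =====
-- def get_entities_values(entities, look_for, tracker, force_find=True, use_tracker=True, priority_tracker=False):
--     result = {}
--     #{'autores': None, 'libro': 'El', 'localizacion': 'biblioteca de informatica', 'numberofmorebooksearch': 1, 'persona': 'Miguel', 'requested_slot': None, 'searchindex': 1}
--
--     for ent in look_for:
--         if use_tracker and priority_tracker:
--             if ent == 'PER':
--                 result[ent] = tracker['autores']
--             else:
--                 result[ent] = tracker[ent]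
--         else:
--             result[ent] = None
--
--     for ent in entities:
--         if ent['entity'] in look_for and result[ent['entity']] is None:
--             result[ent['entity']] = ent['value']
--
--     #Busca si no ha encontrado algo y fuerza rellenarlo
--     if force_find:
--         misc = _find_any(entities)
--         for key, value in result.items():
--             if value is None:
--                 if use_tracker and priority_tracker == False:
--                     if key == 'PER':
--                         result[key] = tracker['autores']
--                     else:
--                         result[key] = tracker[key]
--                 elif result[key] is None and misc is not None:
--                     result[key] = misc
--
--     return result
--
-- def _find_any(entities):
--     if len(entities) == 0:
--         return None
--
--     for ent in entities:
--         if ent['entity'] == 'MISC':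
--             return ent['value']
--
--     return entities[0]['value']
-- ===== SOURCE B (Python) =====
-- def get_entities_values(entities, look_for, tracker, force_find=True, use_tracker=True, priority_tracker=False):
--     # One pass over entities recording the FIRST entity of each label (value read lazily),
--     # then each look_for key's final value is computed directly in a single pass.
--     first_ent = {}
--     for ent in entities:
--         lbl = ent['entity']
--         if lbl not in first_ent:
--             first_ent[lbl] = ent
--     misc = None
--     if force_find and entities:
--         for ent in entities:
--             if ent['entity'] == 'MISC':
--                 misc = ent['value']
--                 break
--         else:
--             misc = entities[0]['value']
--
--     def key_value(key):
--         if use_tracker and priority_tracker: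
--             v = tracker['autores'] if key == 'PER' else tracker[key]
--             if v is None and key in first_ent:
--                 v = first_ent[key]['value']
--             if v is None and force_find and misc is not None:
--                 v = misc
--             return v
--         v = first_ent[key]['value'] if key in first_ent else None
--         if v is None and force_find:
--             if use_tracker:
--                 return tracker['autores'] if key == 'PER' else tracker[key]
--             if misc is not None:
--                 return misc
--         return v
--
--     return {key: key_value(key) for key in look_for}
-- ===== Notes on version B (the rewrite author's own statement) =====
-- stated objective: alternative
-- what changed: A builds the result in three result-wide passes (tracker-init over look_for, a fill pass over entities doing an O(L) 'in look_for' scan and a result lookup per entity, then a force_find repair pass over result.items()); B makes one pass over entities recording the first entity per label and then computes each look_for key's final value directly in a single pass, preserving first-occurrence and None-chaining order and reading exactly the dict keys A reads.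
import Mathlib
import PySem

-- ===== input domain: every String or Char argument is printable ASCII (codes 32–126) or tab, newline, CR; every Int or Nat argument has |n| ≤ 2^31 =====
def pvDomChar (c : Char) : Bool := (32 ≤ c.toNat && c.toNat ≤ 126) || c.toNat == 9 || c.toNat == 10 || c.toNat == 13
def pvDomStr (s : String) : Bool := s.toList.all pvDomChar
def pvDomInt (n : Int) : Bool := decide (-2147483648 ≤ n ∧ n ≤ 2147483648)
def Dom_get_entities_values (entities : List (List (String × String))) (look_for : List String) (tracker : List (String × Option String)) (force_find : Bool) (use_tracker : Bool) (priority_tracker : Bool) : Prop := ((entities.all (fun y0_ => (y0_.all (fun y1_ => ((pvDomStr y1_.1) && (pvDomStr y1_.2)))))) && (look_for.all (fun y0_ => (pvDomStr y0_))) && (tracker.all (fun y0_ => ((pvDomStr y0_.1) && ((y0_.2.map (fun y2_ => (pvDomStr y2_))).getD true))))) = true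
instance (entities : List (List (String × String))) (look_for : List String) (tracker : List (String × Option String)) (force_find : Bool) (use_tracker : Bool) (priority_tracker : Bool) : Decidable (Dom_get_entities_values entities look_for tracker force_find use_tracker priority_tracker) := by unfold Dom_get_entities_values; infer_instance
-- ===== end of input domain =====

-- B replaces A's three result-wide passes (with an O(L) look_for membership scan per entity) by one
-- pass over `entities` recording the first entity per label plus a single per-key computation over `look_for`.

-- shared micro-helpers of both ports: ent['entity'] and the PER-keyed tracker lookup,
-- each ported as Dict.get? (a missing key = Python KeyError, excluded by Pre_)
def pvEnt (e : List (String × String)) : String := ((PySem.Dict.mk e).get? "entity").getD ""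
def pvValOf (e : List (String × String)) : Option String := (PySem.Dict.mk e).get? "value"
def pvTrack (tracker : List (String × Option String)) (k : String) : Option String :=
  ((PySem.Dict.mk tracker).get? (if k == "PER" then "autores" else k)).getD none

-- ===== PORT A =====
-- the 'for ent in entities: if ent['entity'] == 'MISC': return ent['value']' loop of _find_any
def pvFindAnyMisc : List (List (String × String)) → Option (Option String)
  | [] => none
  | e :: rest => if pvEnt e == "MISC" then some (pvValOf e) else pvFindAnyMisc rest

-- _find_any
def pvFindAny (entities : List (List (String × String))) : Option String :=
  if entities.length == 0 then none
  else
    match pvFindAnyMisc entities with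
    | some v => v
    | none =>
        match entities with
        | [] => none
        | e :: _ => pvValOf e

def get_entities_values (entities : List (List (String × String))) (look_for : List String) (tracker : List (String × Option String)) (force_find : Bool) (use_tracker : Bool) (priority_tracker : Bool) : List (String × Option String) :=
  -- for ent in look_for: …
  let r1 : PySem.Dict String (Option String) := look_for.foldl (fun r ent =>
      if use_tracker && priority_tracker then r.insert ent (pvTrack tracker ent)
      else r.insert ent none) PySem.Dict.empty
  -- for ent in entities: …
  let r2 := entities.foldl (fun r ent =>
      if look_for.contains (pvEnt ent) && (r.get? (pvEnt ent) == some none) then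
        r.insert (pvEnt ent) (pvValOf ent)
      else r) r1
  -- if force_find: for key, value in result.items(): … (each step only rewrites the current key's value)
  let r3 := if force_find then
      let misc := pvFindAny entities
      PySem.Dict.mk (r2.items.map (fun p =>
        if p.2 == none then
          if use_tracker && !priority_tracker then (p.1, pvTrack tracker p.1)
          else if misc != none then (p.1, misc) else p
        else p))
    else r2
  r3.items

-- ===== PORT B =====
-- the break-ing MISC scan of Source B
def pvMiscLoop : List (List (String × String)) → Option (Option String)
  | [] => none
  | e :: rest => if pvEnt e == "MISC" then some (pvValOf e) else pvMiscLoop rest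

-- misc of Source B: entities[0]['value'] as the for-else default, overwritten by the first MISC entity's value
def pvMiscB (entities : List (List (String × String))) : Option String :=
  match entities with
  | [] => none
  | e :: _ =>
      match pvMiscLoop entities with
      | some v => v
      | none => pvValOf e

-- key_value of Source B
def pvValB (first_ent : PySem.Dict String (List (String × String))) (misc : Option String) (tracker : List (String × Option String)) (force_find : Bool) (use_tracker : Bool) (priority_tracker : Bool) (key : String) : Option String :=
  if use_tracker && priority_tracker then
    let v0 := pvTrack tracker key
    let v1 := if v0 == none && first_ent.contains key then ((first_ent.get? key).map pvValOf).getD none else v0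
    if v1 == none && force_find && misc != none then misc else v1
  else
    let v0 := if first_ent.contains key then ((first_ent.get? key).map pvValOf).getD none else none
    if v0 == none && force_find then
      if use_tracker then pvTrack tracker key
      else if misc != none then misc else v0
    else v0

def get_entities_values_alt (entities : List (List (String × String))) (look_for : List String) (tracker : List (String × Option String)) (force_find : Bool) (use_tracker : Bool) (priority_tracker : Bool) : List (String × Option String) :=
  let first_ent : PySem.Dict String (List (String × String)) := entities.foldl (fun d ent =>
      if d.contains (pvEnt ent) then d else d.insert (pvEnt ent) ent) PySem.Dict.empty
  let misc := if force_find then pvMiscB entities else none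
  (look_for.foldl (fun r key =>
      r.insert key (pvValB first_ent misc tracker force_find use_tracker priority_tracker key)) PySem.Dict.empty).items

-- first entity carrying label x (first-match scan); none if there is no such entity
def pvFeO : List (List (String × String)) → String → Option (List (String × String))
  | [], _ => none
  | e :: rest, x => if pvEnt e == x then some e else pvFeO rest x

-- its 'value' field: some none = first entity of the label lacks 'value' (a Python KeyError when read)
def pvFvO (entities : List (List (String × String))) (x : String) : Option (Option String) :=
  (pvFeO entities x).map pvValOf

-- first MISC entity's 'value' must exist when _find_any reads it; else entities[0]'s
def pvMiscOk (entities : List (List (String × String))) : Bool :=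
  match entities with
  | [] => true
  | e :: _ =>
      match pvFvO entities "MISC" with
      | some v => v != none
      | none => pvValOf e != none

-- ===== PRECONDITION & SPEC =====
-- Pre_ is exactly the set of inputs on which the Python A returns (no KeyError): every entity dict
-- carries 'entity'; the tracker carries every key A looks up (all look_for keys in priority mode,
-- and in the force_find repair the entity-less keys); the FIRST entity of a look_for label carries
-- 'value' whenever A fills from it; and the entity _find_any reads carries 'value' under force_find.
def Pre_get_entities_values (entities : List (List (String × String))) (look_for : List String) (tracker : List (String × Option String)) (force_find : Bool) (use_tracker : Bool) (priority_tracker : Bool) : Prop :=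
  (∀ e ∈ entities, (PySem.Dict.mk e).contains "entity" = true) ∧
  ((use_tracker && priority_tracker) = true → ∀ k ∈ look_for,
    (PySem.Dict.mk tracker).contains (if k == "PER" then "autores" else k) = true) ∧
  (∀ k ∈ look_for, ((use_tracker && priority_tracker) = true → pvTrack tracker k = none) →
    pvFvO entities k ≠ some none) ∧
  (force_find = true → pvMiscOk entities = true) ∧
  ((force_find && use_tracker && !priority_tracker) = true → ∀ k ∈ look_for,
    (∀ e ∈ entities, pvEnt e ≠ k) →
    (PySem.Dict.mk tracker).contains (if k == "PER" then "autores" else k) = true)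
instance (entities : List (List (String × String))) (look_for : List String) (tracker : List (String × Option String)) (force_find : Bool) (use_tracker : Bool) (priority_tracker : Bool) : Decidable (Pre_get_entities_values entities look_for tracker force_find use_tracker priority_tracker) := by unfold Pre_get_entities_values; infer_instance

def pvWitness_get_entities_values : (List (List (String × String))) × List String × (List (String × Option String)) × Bool × Bool × Bool :=
  ([[("entity", "PER"), ("value", "Juan")]], ["PER", "LOC"], [("autores", some "Cela"), ("LOC", none)], true, true, false)

def Spec_get_entities_values (entities : List (List (String × String))) (look_for : List String) (tracker : List (String × Option String)) (force_find : Bool) (use_tracker : Bool) (priority_tracker : Bool) (out : List (String × Option String)) : Prop := out = get_entities_values_alt entities look_for tracker force_find use_tracker priority_tracker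
instance (entities : List (List (String × String))) (look_for : List String) (tracker : List (String × Option String)) (force_find : Bool) (use_tracker : Bool) (priority_tracker : Bool) (out : List (String × Option String)) : Decidable (Spec_get_entities_values entities look_for tracker force_find use_tracker priority_tracker out) := by unfold Spec_get_entities_values; infer_instance

-- ===== CLAIM (what is proved, stated in full; the proofs are below) =====
def Claim_equal_get_entities_values : Prop := ∀ (entities : List (List (String × String))) (look_for : List String) (tracker : List (String × Option String)) (force_find : Bool) (use_tracker : Bool) (priority_tracker : Bool), Dom_get_entities_values entities look_for tracker force_find use_tracker priority_tracker → Pre_get_entities_values entities look_for tracker force_find use_tracker priority_tracker → Spec_get_entities_values entities look_for tracker force_find use_tracker priority_tracker (get_entities_values entities look_for tracker force_find use_tracker priority_tracker)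

-- ===== LEMMAS AND PROOFS =====

-- the value A's first loop writes for a key
def pvInit (tracker : List (String × Option String)) (ut pt : Bool) (k : String) : Option String :=
  if ut && pt then pvTrack tracker k else none

-- a fold inserting a value that depends only on the key: lookup characterization
theorem pv_fold_pure_get? (f : String → Option String) (l : List String) (d : PySem.Dict String (Option String)) (x : String) :
    (l.foldl (fun r k => r.insert k (f k)) d).get? x = if x ∈ l then some (f x) else d.get? x := by
  induction l generalizing d with
  | nil => simp
  | cons a t ih =>
      simp only [List.foldl_cons]
      rw [ih]
      by_cases hx : x ∈ t
      · simp [hx]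
      · by_cases hxa : x = a
        · subst hxa; simp [hx, PySem.Dict.get?_insert_self]
        · simp [hx, hxa, PySem.Dict.get?_insert_of_ne _ _ hxa]

theorem pv_fold_pure_keys (f : String → Option String) (l : List String) :
    (l.foldl (fun r k => r.insert k (f k)) (PySem.Dict.empty : PySem.Dict String (Option String))).keys = PySem.Set.ofList l := by
  rw [PySem.Dict.keys_foldl_insert]
  simp [PySem.Set.update_nil_left]

-- A's entity loop: per-key value after the loop
theorem pv_phase2_get? (look_for : List String) (entities : List (List (String × String)))
    (r : PySem.Dict String (Option String))
    (hval : ∀ x v, r.get? x = some none → pvFvO entities x = some v → v ≠ none)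
    (hr : ∀ y, (r.get? y).isSome = look_for.contains y) (x : String) :
    (entities.foldl (fun r ent =>
        if look_for.contains (pvEnt ent) && (r.get? (pvEnt ent) == some none) then
          r.insert (pvEnt ent) (pvValOf ent)
        else r) r).get? x
      = (r.get? x).map (fun hx => if hx = none then (pvFvO entities x).getD none else hx) := by
  induction entities generalizing r with
  | nil =>
      simp only [List.foldl_nil, pvFvO, pvFeO]
      cases hq : r.get? x with
      | none => simp
      | some hx => cases hx <;> simp
  | cons e t ih =>
      simp only [List.foldl_cons]
      by_cases hc : (look_for.contains (pvEnt e) && (r.get? (pvEnt e) == some none)) = true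
      · rw [if_pos hc]
        rw [Bool.and_eq_true] at hc
        have hre : r.get? (pvEnt e) = some none := by
          have := hc.2; rwa [beq_iff_eq] at this
        have hv : pvValOf e ≠ none :=
          hval (pvEnt e) (pvValOf e) hre (by simp [pvFvO, pvFeO])
        have hvt : ∀ x v, (r.insert (pvEnt e) (pvValOf e)).get? x = some none → pvFvO t x = some v → v ≠ none := by
          intro x v hxv hfv
          by_cases hxe : x = pvEnt e
          · subst hxe
            rw [PySem.Dict.get?_insert_self] at hxv
            exact absurd (Option.some_injective _ hxv) hv
          · rw [PySem.Dict.get?_insert_of_ne _ _ hxe] at hxv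
            refine hval x v hxv ?_
            have hb : (pvEnt e == x) = false := by simp [Ne.symm hxe]
            simp [pvFvO, pvFeO, hb] at hfv ⊢
            exact hfv
        have hr' : ∀ y, ((r.insert (pvEnt e) (pvValOf e)).get? y).isSome = look_for.contains y := by
          intro y
          by_cases hy : y = pvEnt e
          · subst hy; rw [PySem.Dict.get?_insert_self, hc.1]; rfl
          · rw [PySem.Dict.get?_insert_of_ne _ _ hy]; exact hr y
        rw [ih (r.insert (pvEnt e) (pvValOf e)) hvt hr']
        by_cases hx : x = pvEnt e
        · subst hx
          rw [hre, PySem.Dict.get?_insert_self]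
          simp [pvFvO, pvFeO, hv]
        · rw [PySem.Dict.get?_insert_of_ne _ _ hx]
          have hfv : pvFvO (e :: t) x = pvFvO t x := by
            have : (pvEnt e == x) = false := by simp [Ne.symm hx]
            simp [pvFvO, pvFeO, this]
          rw [hfv]
      · rw [if_neg hc]
        have hvt : ∀ x v, r.get? x = some none → pvFvO t x = some v → v ≠ none := by
          intro x v hxv hfv
          refine hval x v hxv ?_
          by_cases hxe : pvEnt e = x
          · exfalso
            apply hc
            rw [Bool.and_eq_true, hxe]
            refine ⟨?_, by rw [hxv]; rfl⟩
            rw [← hr x, hxv]; rfl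
          · have hb : (pvEnt e == x) = false := by simp [hxe]
            simp [pvFvO, pvFeO, hb] at hfv ⊢
            exact hfv
        rw [ih r hvt hr]
        by_cases hx : pvEnt e = x
        · cases hq : r.get? x with
          | none => simp
          | some hx0 =>
              cases hx0 with
              | none =>
                  exfalso
                  apply hc
                  rw [Bool.and_eq_true, hx]
                  constructor
                  · rw [← hr x, hq]; rfl
                  · rw [hq]; rfl
              | some v => simp
        · have hfv : pvFvO (e :: t) x = pvFvO t x := by
            have : (pvEnt e == x) = false := by simp [hx]
            simp [pvFvO, pvFeO, this]
          rw [hfv]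

-- A's entity loop never changes the key list
theorem pv_phase2_keys (look_for : List String) (entities : List (List (String × String)))
    (r : PySem.Dict String (Option String)) :
    (entities.foldl (fun r ent =>
        if look_for.contains (pvEnt ent) && (r.get? (pvEnt ent) == some none) then
          r.insert (pvEnt ent) (pvValOf ent)
        else r) r).keys = r.keys := by
  induction entities generalizing r with
  | nil => simp
  | cons e t ih =>
      simp only [List.foldl_cons]
      by_cases hc : (look_for.contains (pvEnt e) && (r.get? (pvEnt e) == some none)) = true
      · rw [if_pos hc, ih]
        rw [Bool.and_eq_true] at hc
        have hre : r.get? (pvEnt e) = some none := by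
          have := hc.2; rwa [beq_iff_eq] at this
        apply PySem.Dict.keys_insert_of_contains
        rw [PySem.Dict.contains_eq_isSome_get?, hre]; rfl
      · rw [if_neg hc, ih]

-- B's first_ent loop: lookup = first entity per label
theorem pv_firstent_get? (entities : List (List (String × String)))
    (d : PySem.Dict String (List (String × String))) (x : String) :
    (entities.foldl (fun d ent =>
        if d.contains (pvEnt ent) then d else d.insert (pvEnt ent) ent) d).get? x
      = (d.get? x).or (pvFeO entities x) := by
  induction entities generalizing d with
  | nil => cases hq : d.get? x <;> simp [pvFeO, hq]
  | cons e t ih =>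
      simp only [List.foldl_cons]
      by_cases hc : d.contains (pvEnt e) = true
      · rw [if_pos hc, ih]
        by_cases hx : pvEnt e = x
        · subst hx
          have : (d.get? (pvEnt e)).isSome := by
            rw [← PySem.Dict.contains_eq_isSome_get?, hc]
          cases hq : d.get? (pvEnt e) with
          | none => rw [hq] at this; simp at this
          | some v => simp [hq]
        · have hfv : pvFeO (e :: t) x = pvFeO t x := by
            have : (pvEnt e == x) = false := by simp [hx]
            simp [pvFeO, this]
          rw [hfv]
      · rw [if_neg hc, ih]
        have hdn : d.get? (pvEnt e) = none := by
          cases hq : d.get? (pvEnt e) with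
          | none => rfl
          | some v =>
              exfalso; apply hc
              rw [PySem.Dict.contains_eq_isSome_get?, hq]; rfl
        by_cases hx : pvEnt e = x
        · subst hx
          rw [hdn, PySem.Dict.get?_insert_self]
          simp [pvFeO]
        · rw [PySem.Dict.get?_insert_of_ne _ _ (Ne.symm hx)]
          have hfv : pvFeO (e :: t) x = pvFeO t x := by
            have : (pvEnt e == x) = false := by simp [hx]
            simp [pvFeO, this]
          rw [hfv]

-- the two MISC scans are the same loop
theorem pv_miscLoop_eq (l : List (List (String × String))) : pvMiscLoop l = pvFindAnyMisc l := by
  induction l with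
  | nil => rfl
  | cons e t ih => simp [pvMiscLoop, pvFindAnyMisc, ih]

theorem pv_misc_eq (entities : List (List (String × String))) : pvMiscB entities = pvFindAny entities := by
  cases entities with
  | nil => rfl
  | cons e t => simp [pvMiscB, pvFindAny, pv_miscLoop_eq]

-- ===== VERDICT (by name: the statement is the Claim_ definition above) =====
theorem get_entities_values_spec : Claim_equal_get_entities_values := by
  intro entities look_for tracker ff ut pt _hdom hpre
  obtain ⟨_hent, _htr2, hval3, _hmisc, _htr5⟩ := hpre
  simp only [Spec_get_entities_values, get_entities_values, get_entities_values_alt]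
  have hstep1 : (fun (r : PySem.Dict String (Option String)) (ent : String) =>
      if ut && pt then r.insert ent (pvTrack tracker ent) else r.insert ent none)
      = fun r k => r.insert k (pvInit tracker ut pt k) := by
    funext r k
    by_cases h : (ut && pt) = true <;> simp [pvInit, h]
  rw [hstep1]
  have hr1 : ∀ x, (look_for.foldl (fun r k => r.insert k (pvInit tracker ut pt k)) PySem.Dict.empty).get? x
      = if x ∈ look_for then some (pvInit tracker ut pt x) else none := by
    intro x; rw [pv_fold_pure_get?]; simp [PySem.Dict.get?_empty]
  have hr1some : ∀ y, ((look_for.foldl (fun r k => r.insert k (pvInit tracker ut pt k)) PySem.Dict.empty).get? y).isSome = look_for.contains y := by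
    intro y; rw [hr1]
    by_cases hy : y ∈ look_for
    · simp [hy, List.contains_iff_mem.mpr hy]
    · have hcf : look_for.contains y = false := by
        rw [Bool.eq_false_iff]; intro hcon; exact hy (List.contains_iff_mem.mp hcon)
      simp [hy, hcf]
  have hval0 : ∀ x v, (look_for.foldl (fun r k => r.insert k (pvInit tracker ut pt k)) PySem.Dict.empty).get? x = some none → pvFvO entities x = some v → v ≠ none := by
    intro x v hx hfv hvn
    rw [hr1] at hx
    by_cases hxl : x ∈ look_for
    · rw [if_pos hxl] at hx
      have hinit : pvInit tracker ut pt x = none := Option.some_injective _ hx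
      refine hval3 x hxl ?_ (by rw [hfv, hvn])
      intro hup
      simpa [pvInit, hup] using hinit
    · rw [if_neg hxl] at hx; simp at hx
  have hA2get := pv_phase2_get? look_for entities
    (look_for.foldl (fun r k => r.insert k (pvInit tracker ut pt k)) PySem.Dict.empty)
    hval0 hr1some
  have hA2keys : (entities.foldl (fun r ent =>
      if look_for.contains (pvEnt ent) && (r.get? (pvEnt ent) == some none) then
        r.insert (pvEnt ent) (pvValOf ent)
      else r) (look_for.foldl (fun r k => r.insert k (pvInit tracker ut pt k)) PySem.Dict.empty)).keys
      = PySem.Set.ofList look_for := by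
    rw [pv_phase2_keys, pv_fold_pure_keys]
  have hA2nodup := hA2keys ▸ PySem.Set.nodup_ofList look_for
  have hA2getD : ∀ k ∈ look_for, (entities.foldl (fun r ent =>
      if look_for.contains (pvEnt ent) && (r.get? (pvEnt ent) == some none) then
        r.insert (pvEnt ent) (pvValOf ent)
      else r) (look_for.foldl (fun r k => r.insert k (pvInit tracker ut pt k)) PySem.Dict.empty)).getD k none
      = (if pvInit tracker ut pt k = none then (pvFvO entities k).getD none else pvInit tracker ut pt k) := by
    intro k hk
    rw [PySem.Dict.getD_eq_get?_getD, hA2get, hr1]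
    simp [hk]
  have hFE : ∀ k, (entities.foldl (fun d ent =>
      if d.contains (pvEnt ent) then d else d.insert (pvEnt ent) ent) (PySem.Dict.empty : PySem.Dict String (List (String × String)))).get? k = pvFeO entities k := by
    intro k; rw [pv_firstent_get?]; simp [PySem.Dict.get?_empty]
  have hFVal : ∀ k, (if (entities.foldl (fun d ent =>
      if d.contains (pvEnt ent) then d else d.insert (pvEnt ent) ent) (PySem.Dict.empty : PySem.Dict String (List (String × String)))).contains k then
        (((entities.foldl (fun d ent =>
          if d.contains (pvEnt ent) then d else d.insert (pvEnt ent) ent) (PySem.Dict.empty : PySem.Dict String (List (String × String)))).get? k).map pvValOf).getD none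
      else none) = (pvFvO entities k).getD none := by
    intro k
    rw [PySem.Dict.contains_eq_isSome_get?, hFE]
    cases hq : pvFeO entities k <;> simp [pvFvO, hq]
  have hBitems : (look_for.foldl (fun r key =>
      r.insert key (pvValB (entities.foldl (fun d ent =>
        if d.contains (pvEnt ent) then d else d.insert (pvEnt ent) ent) PySem.Dict.empty)
        (if ff then pvMiscB entities else none) tracker ff ut pt key)) PySem.Dict.empty).items
      = (PySem.Set.ofList look_for).map (fun k => (k, pvValB (entities.foldl (fun d ent =>
        if d.contains (pvEnt ent) then d else d.insert (pvEnt ent) ent) PySem.Dict.empty)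
        (if ff then pvMiscB entities else none) tracker ff ut pt k)) := by
    rw [PySem.Dict.items_eq_map_keys _ (by rw [pv_fold_pure_keys]; exact PySem.Set.nodup_ofList _) none]
    rw [pv_fold_pure_keys]
    apply List.map_congr_left
    intro k hk
    have hkl : k ∈ look_for := (PySem.Set.mem_ofList _ _).mp hk
    rw [PySem.Dict.getD_eq_get?_getD, pv_fold_pure_get?]
    simp [hkl]
  rw [hBitems]
  have hVB : ∀ (m : Option String) (ff' : Bool) (k : String),
      pvValB (entities.foldl (fun d ent =>
        if d.contains (pvEnt ent) then d else d.insert (pvEnt ent) ent) PySem.Dict.empty)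
        m tracker ff' ut pt k
      = (if ut && pt then
          (let v0 := pvTrack tracker k
           let v1 := if v0 == none then (pvFvO entities k).getD none else v0
           if v1 == none && ff' && m != none then m else v1)
        else
          (let v0 := (pvFvO entities k).getD none
           if v0 == none && ff' then
             if ut then pvTrack tracker k else if m != none then m else v0
           else v0)) := by
    intro m ff' k
    by_cases hup : (ut && pt) = true
    · simp only [pvValB, hup, if_true]
      cases htv : pvTrack tracker k
      · rw [show (if ((none : Option String) == none) && (entities.foldl (fun d ent =>
            if d.contains (pvEnt ent) then d else d.insert (pvEnt ent) ent) PySem.Dict.empty).contains k then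
              (((entities.foldl (fun d ent =>
                if d.contains (pvEnt ent) then d else d.insert (pvEnt ent) ent) PySem.Dict.empty).get? k).map pvValOf).getD none
            else (none : Option String))
          = (pvFvO entities k).getD none from by rw [← hFVal k]; simp]
        rfl
      · simp [htv]
    · simp only [pvValB, hup, Bool.false_eq_true, if_false]
      rw [hFVal k]
  have hperkey : ∀ k ∈ look_for,
      (fun p : String × Option String =>
        if p.2 == none then
          if ut && !pt then (p.1, pvTrack tracker p.1)
          else if pvFindAny entities != none then (p.1, pvFindAny entities) else p
        else p) (k, if pvInit tracker ut pt k = none then (pvFvO entities k).getD none else pvInit tracker ut pt k)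
      = (k, pvValB (entities.foldl (fun d ent =>
          if d.contains (pvEnt ent) then d else d.insert (pvEnt ent) ent) PySem.Dict.empty)
          (if true then pvMiscB entities else none) tracker true ut pt k) := by
    intro k hk
    rw [← pv_misc_eq entities]
    rw [show (if true = true then pvMiscB entities else none) = pvMiscB entities from rfl]
    rw [hVB (pvMiscB entities) true k]
    simp only [pvInit]
    cases ut <;> cases pt <;>
      cases htv : pvTrack tracker k <;> cases hfv : (pvFvO entities k).getD none <;> cases hm : pvMiscB entities <;>
        simp [htv, hfv, hm]
  have hperkeyF : ∀ k ∈ look_for,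
      (if pvInit tracker ut pt k = none then (pvFvO entities k).getD none else pvInit tracker ut pt k)
      = pvValB (entities.foldl (fun d ent =>
          if d.contains (pvEnt ent) then d else d.insert (pvEnt ent) ent) PySem.Dict.empty)
          (if false then pvMiscB entities else none) tracker false ut pt k := by
    intro k hk
    rw [show (if false = true then pvMiscB entities else none) = none from rfl]
    rw [hVB none false k]
    simp only [pvInit]
    cases ut <;> cases pt <;>
      cases htv : pvTrack tracker k <;> cases hfv : (pvFvO entities k).getD none <;>
        simp [htv, hfv]
  cases ff with
  | false =>
      simp only [Bool.false_eq_true, if_false]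
      rw [PySem.Dict.items_eq_map_keys _ hA2nodup none, hA2keys]
      apply List.map_congr_left
      intro k hk
      have hkl : k ∈ look_for := (PySem.Set.mem_ofList _ _).mp hk
      rw [hA2getD k hkl, hperkeyF k hkl]
      rfl
  | true =>
      simp only [if_true]
      show ((entities.foldl (fun r ent =>
          if look_for.contains (pvEnt ent) && (r.get? (pvEnt ent) == some none) then
            r.insert (pvEnt ent) (pvValOf ent)
          else r) (look_for.foldl (fun r k => r.insert k (pvInit tracker ut pt k)) PySem.Dict.empty)).items.map _) = _
      rw [PySem.Dict.items_eq_map_keys _ hA2nodup none, hA2keys, List.map_map]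
      apply List.map_congr_left
      intro k hk
      have hkl : k ∈ look_for := (PySem.Set.mem_ofList _ _).mp hk
      show (fun p : String × Option String =>
          if p.2 == none then
            if ut && !pt then (p.1, pvTrack tracker p.1)
            else if pvFindAny entities != none then (p.1, pvFindAny entities) else p
          else p) (k, (entities.foldl (fun r ent =>
            if look_for.contains (pvEnt ent) && (r.get? (pvEnt ent) == some none) then
              r.insert (pvEnt ent) (pvValOf ent)
            else r) (look_for.foldl (fun r k => r.insert k (pvInit tracker ut pt k)) PySem.Dict.empty)).getD k none)
          = _
      rw [hA2getD k hkl]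
      exact hperkey k hkl
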